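-- pv_equiv track=rewrite | github.com/TamerOnLine/lernen | logic/waffaq.py | recommend_waffaq_type
-- ===== SOURCE A (Python) =====
-- def generate_odd_magic_square(n):
--     square = [[0] * n for _ in range(n)]
--     num, i, j = 1, 0, n // 2
--     while num <= n * n:
--         square[i][j] = num
--         num += 1
--         newi, newj = (i - 1) % n, (j + 1) % n
--         if square[newi][newj]:
--             i += 1
--         else:
--             i, j = newi, newj
--     return square
--
-- def generate_doubly_even_magic_square(n):
--     square = [[(n * y) + x + 1 for x in range(n)] for y in range(n)]
--     for i in range(n):
--         for j in range(n):
--             if (i % 4 == j % 4) or ((i % 4 + j % 4) == 3):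
--                 square[i][j] = (n * n + 1) - square[i][j]
--     return square
--
-- def generate_singly_even_magic_square(n):
--     half = n // 2
--     sub = generate_odd_magic_square(half)
--     square = [[0] * n for _ in range(n)]
--     add = [0, 2, 3, 1]
--     for i in range(half):
--         for j in range(half):
--             for k in range(4):
--                 r = i + (k // 2) * half
--                 c = j + (k % 2) * half
--                 square[r][c] = sub[i][j] + add[k] * half * half
--     k = (n - 2) // 4
--     for i in range(n):
--         for j in range(n):
--             if (i < half and (j < k or j >= n - k)) or (i >= half and (k <= j < n - k)):
--                 if not (i == half and j == k):
--                     square[i][j], square[i - half][j] = square[i - half][j], square[i][j]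
--     return square
--
-- def generate_magic_square(n):
--     if n % 2 == 1:
--         return generate_odd_magic_square(n)
--     elif n % 4 == 0:
--         return generate_doubly_even_magic_square(n)
--     else:
--         return generate_singly_even_magic_square(n)
--
-- def scale_magic_square(square, multiplier):
--     return [[val * multiplier for val in row] for row in square]
--
-- def recommend_waffaq_type(value):
--     for size in range(3, 20):
--         cells = size * size
--         if value % cells == 0:
--             multiplier = value // cells
--             square = generate_magic_square(size)
--             scaled = scale_magic_square(square, multiplier)
--             return size, multiplier, scaled
--     return None, None, None
-- ===== SOURCE B (Python) =====
-- def _cell(n, i, j):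
--     """Entry (i, j) of the n x n magic square, for n odd or a multiple of 4."""
--     if n % 2 == 1:
--         # De la Loubere (Siamese) closed form
--         return n * ((i + j + 1 + n // 2) % n) + ((i + 2 * j - 2 * (n // 2)) % n) + 1
--     base = n * i + j + 1
--     if i % 4 == j % 4 or i % 4 + j % 4 == 3:
--         return n * n + 1 - base
--     return base
--
--
-- def recommend_waffaq_type(value):
--     # If (2m)^2 divides value for odd m >= 3, then m^2 already divides value and
--     # m < 2m, so the first size in 3..19 whose square divides value is always
--     # odd or a multiple of 4; only those two closed forms are needed.
--     size = next((s for s in range(3, 20) if value % (s * s) == 0), None)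
--     if size is None:
--         return None, None, None
--     multiplier = value // (size * size)
--     return size, multiplier, [[_cell(size, i, j) * multiplier
--                                for j in range(size)] for i in range(size)]
-- ===== Notes on version B (the rewrite author's own statement) =====
-- stated objective: alternative
-- what changed: The stateful magic-square builders (Siamese placement loop with collision branch, doubly-even in-place complement pass, singly-even fill/swap passes) are replaced by closed-form per-cell formulas in a nested comprehension; B uses the fact that a singly-even size 2m can never be the first size whose square divides the value (m^2 already divides it), so only the odd and doubly-even closed forms exist.
import Mathlib
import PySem

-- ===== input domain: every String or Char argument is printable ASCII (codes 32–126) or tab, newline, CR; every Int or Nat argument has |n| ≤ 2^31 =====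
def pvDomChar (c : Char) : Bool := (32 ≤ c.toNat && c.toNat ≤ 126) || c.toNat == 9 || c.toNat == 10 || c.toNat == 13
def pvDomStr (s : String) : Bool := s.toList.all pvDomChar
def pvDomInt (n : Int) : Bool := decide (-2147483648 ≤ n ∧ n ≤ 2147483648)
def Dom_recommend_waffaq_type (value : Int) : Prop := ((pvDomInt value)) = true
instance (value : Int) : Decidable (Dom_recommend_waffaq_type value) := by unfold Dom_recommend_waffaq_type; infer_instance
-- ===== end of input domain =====

-- B replaces the stateful magic-square builders by closed-form per-cell formulas (odd Siamese
-- and doubly-even complement), using that the first size whose square divides the value is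
-- never singly even; objective: alternative.

-- ===== PORT A =====

-- square[i][j] read with Python index semantics (negative wrap; in-range in all of A's uses,
-- so the default 0 of the out-of-range case is never returned on the executed paths)
def pvGet2 (sq : List (List Int)) (i j : Int) : Int :=
  match PySem.List.pyGet? sq i with
  | none => 0
  | some row => (PySem.List.pyGet? row j).getD 0

-- xs[i] = v with Python index semantics (negative wrap; in-range in all of A's uses)
def pvSet1 {α : Type} (xs : List α) (i : Int) (v : α) : List α :=
  let n : Int := xs.length
  let k := if i < 0 then i + n else i
  if 0 ≤ k ∧ k < n then xs.set k.toNat v else xs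

-- square[i][j] = v
def pvSet2 (sq : List (List Int)) (i j : Int) (v : Int) : List (List Int) :=
  match PySem.List.pyGet? sq i with
  | none => sq
  | some row => pvSet1 sq i (pvSet1 row j v)

-- the while-loop of generate_odd_magic_square; fuel = n*n bounds the number of iterations
-- (num starts at 1 and grows by 1 each pass, the loop runs while num ≤ n*n)
def genOddLoop (n : Int) : Nat → List (List Int) → Int → Int → Int → List (List Int)
  | 0, sq, _, _, _ => sq
  | fuel + 1, sq, num, i, j =>
    if num ≤ n * n then
      let sq' := pvSet2 sq i j num
      let num' := num + 1
      let newi := PySem.Int.mod (i - 1) n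
      let newj := PySem.Int.mod (j + 1) n
      if pvGet2 sq' newi newj ≠ 0 then
        genOddLoop n fuel sq' num' (i + 1) j
      else
        genOddLoop n fuel sq' num' newi newj
    else sq

def generate_odd_magic_square (n : Int) : List (List Int) :=
  let square := List.replicate n.toNat (List.replicate n.toNat (0 : Int))
  genOddLoop n (n * n).toNat square 1 0 (PySem.Int.floordiv n 2)

def generate_doubly_even_magic_square (n : Int) : List (List Int) :=
  let square := (PySem.List.pyRange 0 n 1).map
    (fun y => (PySem.List.pyRange 0 n 1).map (fun x => n * y + x + 1))
  (PySem.List.pyRange 0 n 1).foldl (fun sq i =>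
    (PySem.List.pyRange 0 n 1).foldl (fun sq j =>
      if PySem.Int.mod i 4 == PySem.Int.mod j 4 ||
         (PySem.Int.mod i 4 + PySem.Int.mod j 4) == 3 then
        pvSet2 sq i j ((n * n + 1) - pvGet2 sq i j)
      else sq) sq) square

-- the first (fill) loop nest of generate_singly_even_magic_square
def seFill (half : Int) (sub square : List (List Int)) : List (List Int) :=
  let add : List Int := [0, 2, 3, 1]
  (PySem.List.pyRange 0 half 1).foldl (fun sq i =>
    (PySem.List.pyRange 0 half 1).foldl (fun sq j =>
      (PySem.List.pyRange 0 4 1).foldl (fun sq k =>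
        let r := i + (PySem.Int.floordiv k 2) * half
        let c := j + (PySem.Int.mod k 2) * half
        pvSet2 sq r c (pvGet2 sub i j + ((PySem.List.pyGet? add k).getD 0) * half * half))
        sq) sq) square

-- the second (swap) loop nest of generate_singly_even_magic_square
def seSwap (n half k : Int) (square : List (List Int)) : List (List Int) :=
  (PySem.List.pyRange 0 n 1).foldl (fun sq i =>
    (PySem.List.pyRange 0 n 1).foldl (fun sq j =>
      if (i < half ∧ (j < k ∨ j ≥ n - k)) ∨ (i ≥ half ∧ (k ≤ j ∧ j < n - k)) then
        if ¬ (i = half ∧ j = k) then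
          -- simultaneous swap: RHS pair evaluated first, then assigned left to right
          let a := pvGet2 sq i j
          let b := pvGet2 sq (i - half) j
          let sq' := pvSet2 sq i j b
          pvSet2 sq' (i - half) j a
        else sq
      else sq) sq) square

def generate_singly_even_magic_square (n : Int) : List (List Int) :=
  let half := PySem.Int.floordiv n 2
  let sub := generate_odd_magic_square half
  let square0 := List.replicate n.toNat (List.replicate n.toNat (0 : Int))
  let square1 := seFill half sub square0
  let k := PySem.Int.floordiv (n - 2) 4
  seSwap n half k square1

def generate_magic_square (n : Int) : List (List Int) :=
  if PySem.Int.mod n 2 == 1 then generate_odd_magic_square n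
  else if PySem.Int.mod n 4 == 0 then generate_doubly_even_magic_square n
  else generate_singly_even_magic_square n

def scale_magic_square (square : List (List Int)) (multiplier : Int) : List (List Int) :=
  square.map (fun row => row.map (fun val => val * multiplier))

def recWaffaqLoop (value : Int) : List Int → Option Int × Option Int × Option (List (List Int))
  | [] => (none, none, none)
  | size :: rest =>
    let cells := size * size
    if PySem.Int.mod value cells == 0 then
      let multiplier := PySem.Int.floordiv value cells
      (some size, some multiplier, some (scale_magic_square (generate_magic_square size) multiplier))
    else recWaffaqLoop value rest

def recommend_waffaq_type (value : Int) : Option Int × Option Int × Option (List (List Int)) :=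
  recWaffaqLoop value (PySem.List.pyRange 3 20 1)

-- ===== PORT B =====

-- Source B's _cell: closed-form entry (i, j) of the n x n magic square, n odd or a multiple of 4
def cellAlt (n i j : Int) : Int :=
  if PySem.Int.mod n 2 == 1 then
    n * PySem.Int.mod (i + j + 1 + PySem.Int.floordiv n 2) n +
      PySem.Int.mod (i + 2 * j - 2 * PySem.Int.floordiv n 2) n + 1
  else
    let base := n * i + j + 1
    if PySem.Int.mod i 4 == PySem.Int.mod j 4 ||
       PySem.Int.mod i 4 + PySem.Int.mod j 4 == 3 then (n * n + 1) - base else base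

def recommend_waffaq_type_alt (value : Int) : Option Int × Option Int × Option (List (List Int)) :=
  match (PySem.List.pyRange 3 20 1).find? (fun s => PySem.Int.mod value (s * s) == 0) with
  | none => (none, none, none)
  | some size =>
    let multiplier := PySem.Int.floordiv value (size * size)
    (some size, some multiplier,
      some ((PySem.List.pyRange 0 size 1).map (fun i =>
        (PySem.List.pyRange 0 size 1).map (fun j => cellAlt size i j * multiplier))))

-- ===== PRECONDITION & SPEC =====
def Spec_recommend_waffaq_type (value : Int) (out : Option Int × Option Int × Option (List (List Int))) : Prop := out = recommend_waffaq_type_alt value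
instance (value : Int) (out : Option Int × Option Int × Option (List (List Int))) : Decidable (Spec_recommend_waffaq_type value out) := by unfold Spec_recommend_waffaq_type; infer_instance

-- ===== CLAIM (what is proved, stated in full; the proofs are below) =====
def Claim_equal_recommend_waffaq_type : Prop := ∀ (value : Int), Dom_recommend_waffaq_type value → Spec_recommend_waffaq_type value (recommend_waffaq_type value)

-- ===== LEMMAS AND PROOFS =====
set_option maxRecDepth 40000
set_option maxHeartbeats 2000000

-- B's unscaled grid for size n
def cellGrid (n : Int) : List (List Int) :=
  (PySem.List.pyRange 0 n 1).map (fun i => (PySem.List.pyRange 0 n 1).map (fun j => cellAlt n i j))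

theorem scale_cellGrid (n m : Int) :
    scale_magic_square (cellGrid n) m =
      (PySem.List.pyRange 0 n 1).map (fun i =>
        (PySem.List.pyRange 0 n 1).map (fun j => cellAlt n i j * m)) := by
  simp [scale_magic_square, cellGrid, List.map_map, Function.comp]

-- the sizes the scan can actually select: no proper divisor ≥ 3, i.e. {3,4,5,7,11,13,17,19}
theorem grid_eq_3 : generate_magic_square 3 = cellGrid 3 := by decide
theorem grid_eq_4 : generate_magic_square 4 = cellGrid 4 := by decide
theorem grid_eq_5 : generate_magic_square 5 = cellGrid 5 := by decide
theorem grid_eq_7 : generate_magic_square 7 = cellGrid 7 := by decide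
theorem grid_eq_11 : generate_magic_square 11 = cellGrid 11 := by decide
theorem grid_eq_13 : generate_magic_square 13 = cellGrid 13 := by decide
theorem grid_eq_17 : generate_magic_square 17 = cellGrid 17 := by decide
theorem grid_eq_19 : generate_magic_square 19 = cellGrid 19 := by decide

-- one scan step, divisor found / not found
theorem loop_pos (value s : Int) (rest : List Int)
    (h : (PySem.Int.mod value (s * s) == 0) = true) :
    recWaffaqLoop value (s :: rest) =
      (some s, some (PySem.Int.floordiv value (s * s)),
        some (scale_magic_square (generate_magic_square s) (PySem.Int.floordiv value (s * s)))) := by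
  simp [recWaffaqLoop, h]

theorem loop_neg (value s : Int) (rest : List Int)
    (h : (PySem.Int.mod value (s * s) == 0) = false) :
    recWaffaqLoop value (s :: rest) = recWaffaqLoop value rest := by
  simp [recWaffaqLoop, h]

-- divisibility transfers down the scan: b ∣ a and a | value give mod value b = 0
theorem mod_zero_of_dvd (value a b : Int) (hd : b ∣ a)
    (h : PySem.Int.mod value a = 0) : PySem.Int.mod value b = 0 :=
  (PySem.Int.mod_eq_zero_iff_dvd value b).mpr
    (hd.trans ((PySem.Int.mod_eq_zero_iff_dvd value a).mp h))

theorem range_eq : PySem.List.pyRange 3 20 1 =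
    [3,4,5,6,7,8,9,10,11,12,13,14,15,16,17,18,19] := by decide

-- the B-side value when the first divisor size is s
def bAt (value s : Int) : Option Int × Option Int × Option (List (List Int)) :=
  (some s, some (PySem.Int.floordiv value (s * s)),
    some ((PySem.List.pyRange 0 s 1).map (fun i =>
      (PySem.List.pyRange 0 s 1).map (fun j => cellAlt s i j * PySem.Int.floordiv value (s * s)))))

theorem found_eq (value s : Int) (hgrid : generate_magic_square s = cellGrid s)
    (rest : List Int) (h : (PySem.Int.mod value (s * s) == 0) = true) :
    recWaffaqLoop value (s :: rest) = bAt value s := by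
  rw [loop_pos value s rest h, hgrid, scale_cellGrid]; rfl

-- ===== VERDICT (by name: the statement is the Claim_ definition above) =====
theorem recommend_waffaq_type_spec : Claim_equal_recommend_waffaq_type := by
  intro value _
  unfold Spec_recommend_waffaq_type recommend_waffaq_type recommend_waffaq_type_alt
  rw [range_eq]
  by_cases h3 : (PySem.Int.mod value (3 * 3) == 0) = true
  · rw [found_eq value 3 grid_eq_3 _ h3, List.find?_cons_of_pos (by simpa using h3)]; rfl
  rw [loop_neg value 3 _ (by simpa using h3), List.find?_cons_of_neg (by simpa using h3)]
  by_cases h4 : (PySem.Int.mod value (4 * 4) == 0) = true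
  · rw [found_eq value 4 grid_eq_4 _ h4, List.find?_cons_of_pos (by simpa using h4)]; rfl
  rw [loop_neg value 4 _ (by simpa using h4), List.find?_cons_of_neg (by simpa using h4)]
  by_cases h5 : (PySem.Int.mod value (5 * 5) == 0) = true
  · rw [found_eq value 5 grid_eq_5 _ h5, List.find?_cons_of_pos (by simpa using h5)]; rfl
  rw [loop_neg value 5 _ (by simpa using h5), List.find?_cons_of_neg (by simpa using h5)]
  by_cases h6 : (PySem.Int.mod value (6 * 6) == 0) = true
  · exact absurd (by simpa using mod_zero_of_dvd value (6 * 6) (3 * 3) (by norm_num) (by simpa using h6) : (PySem.Int.mod value (3 * 3) == 0) = true) h3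
  rw [loop_neg value 6 _ (by simpa using h6), List.find?_cons_of_neg (by simpa using h6)]
  by_cases h7 : (PySem.Int.mod value (7 * 7) == 0) = true
  · rw [found_eq value 7 grid_eq_7 _ h7, List.find?_cons_of_pos (by simpa using h7)]; rfl
  rw [loop_neg value 7 _ (by simpa using h7), List.find?_cons_of_neg (by simpa using h7)]
  by_cases h8 : (PySem.Int.mod value (8 * 8) == 0) = true
  · exact absurd (by simpa using mod_zero_of_dvd value (8 * 8) (4 * 4) (by norm_num) (by simpa using h8) : (PySem.Int.mod value (4 * 4) == 0) = true) h4
  rw [loop_neg value 8 _ (by simpa using h8), List.find?_cons_of_neg (by simpa using h8)]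
  by_cases h9 : (PySem.Int.mod value (9 * 9) == 0) = true
  · exact absurd (by simpa using mod_zero_of_dvd value (9 * 9) (3 * 3) (by norm_num) (by simpa using h9) : (PySem.Int.mod value (3 * 3) == 0) = true) h3
  rw [loop_neg value 9 _ (by simpa using h9), List.find?_cons_of_neg (by simpa using h9)]
  by_cases h10 : (PySem.Int.mod value (10 * 10) == 0) = true
  · exact absurd (by simpa using mod_zero_of_dvd value (10 * 10) (5 * 5) (by norm_num) (by simpa using h10) : (PySem.Int.mod value (5 * 5) == 0) = true) h5
  rw [loop_neg value 10 _ (by simpa using h10), List.find?_cons_of_neg (by simpa using h10)]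
  by_cases h11 : (PySem.Int.mod value (11 * 11) == 0) = true
  · rw [found_eq value 11 grid_eq_11 _ h11, List.find?_cons_of_pos (by simpa using h11)]; rfl
  rw [loop_neg value 11 _ (by simpa using h11), List.find?_cons_of_neg (by simpa using h11)]
  by_cases h12 : (PySem.Int.mod value (12 * 12) == 0) = true
  · exact absurd (by simpa using mod_zero_of_dvd value (12 * 12) (3 * 3) (by norm_num) (by simpa using h12) : (PySem.Int.mod value (3 * 3) == 0) = true) h3
  rw [loop_neg value 12 _ (by simpa using h12), List.find?_cons_of_neg (by simpa using h12)]
  by_cases h13 : (PySem.Int.mod value (13 * 13) == 0) = true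
  · rw [found_eq value 13 grid_eq_13 _ h13, List.find?_cons_of_pos (by simpa using h13)]; rfl
  rw [loop_neg value 13 _ (by simpa using h13), List.find?_cons_of_neg (by simpa using h13)]
  by_cases h14 : (PySem.Int.mod value (14 * 14) == 0) = true
  · exact absurd (by simpa using mod_zero_of_dvd value (14 * 14) (7 * 7) (by norm_num) (by simpa using h14) : (PySem.Int.mod value (7 * 7) == 0) = true) h7
  rw [loop_neg value 14 _ (by simpa using h14), List.find?_cons_of_neg (by simpa using h14)]
  by_cases h15 : (PySem.Int.mod value (15 * 15) == 0) = true
  · exact absurd (by simpa using mod_zero_of_dvd value (15 * 15) (3 * 3) (by norm_num) (by simpa using h15) : (PySem.Int.mod value (3 * 3) == 0) = true) h3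
  rw [loop_neg value 15 _ (by simpa using h15), List.find?_cons_of_neg (by simpa using h15)]
  by_cases h16 : (PySem.Int.mod value (16 * 16) == 0) = true
  · exact absurd (by simpa using mod_zero_of_dvd value (16 * 16) (4 * 4) (by norm_num) (by simpa using h16) : (PySem.Int.mod value (4 * 4) == 0) = true) h4
  rw [loop_neg value 16 _ (by simpa using h16), List.find?_cons_of_neg (by simpa using h16)]
  by_cases h17 : (PySem.Int.mod value (17 * 17) == 0) = true
  · rw [found_eq value 17 grid_eq_17 _ h17, List.find?_cons_of_pos (by simpa using h17)]; rfl
  rw [loop_neg value 17 _ (by simpa using h17), List.find?_cons_of_neg (by simpa using h17)]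
  by_cases h18 : (PySem.Int.mod value (18 * 18) == 0) = true
  · exact absurd (by simpa using mod_zero_of_dvd value (18 * 18) (3 * 3) (by norm_num) (by simpa using h18) : (PySem.Int.mod value (3 * 3) == 0) = true) h3
  rw [loop_neg value 18 _ (by simpa using h18), List.find?_cons_of_neg (by simpa using h18)]
  by_cases h19 : (PySem.Int.mod value (19 * 19) == 0) = true
  · rw [found_eq value 19 grid_eq_19 _ h19, List.find?_cons_of_pos (by simpa using h19)]; rfl
  rw [loop_neg value 19 _ (by simpa using h19), List.find?_cons_of_neg (by simpa using h19)]
  rfl
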